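-- pv_equiv track=rewrite | github.com/nicholas2295/Deck-Analyzer | Ian Email/anomaly_extract.py | score_slide
-- ===== SOURCE A (Python) =====
-- def score_slide(anomalies, memory):
--     """Score a slide by severity for ranking. Higher = more likely Ian questions it."""
--     score = 0
--     for a in anomalies:
--         if "SEVERE" in a:
--             score += 10
--         elif "MODERATE" in a:
--             score += 6
--         elif "MILD" in a:
--             score += 3
--         elif "MASKED LOSS" in a:
--             score += 8
--         elif "CRISIS" in a:
--             score += 9
--         elif "CROSS-SLIDE MISMATCH" in a:
--             score += 8
--         elif "NEW PROPOSAL" in a: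
--             score += 7
--         elif "COMPENSATION" in a:
--             score += 7
--         elif "STATED CAUSE" in a:
--             score += 7
--         elif "MARKET LAUNCH" in a:
--             score += 6
--         elif "ASSORTMENT" in a:
--             score += 6
--         elif "UE/PRICING" in a:
--             score += 6
--         elif "MULTIPLE TABLES" in a:
--             score += 6
--         elif "ACQUISITION TABLE" in a:
--             score += 5
--         elif "DECLINE" in a:
--             score += 5
--         elif "P&L MISS" in a:
--             score += 6
--         elif "GAP" in a:
--             score += 6
--         elif "DELAYED" in a:
--             score += 3
--     for _ in memory:
--         score += 2
--     return score
-- ===== SOURCE B (Python) =====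
-- _SEVERITY_TABLE = [
--     ("SEVERE", 10),
--     ("MODERATE", 6),
--     ("MILD", 3),
--     ("MASKED LOSS", 8),
--     ("CRISIS", 9),
--     ("CROSS-SLIDE MISMATCH", 8),
--     ("NEW PROPOSAL", 7),
--     ("COMPENSATION", 7),
--     ("STATED CAUSE", 7),
--     ("MARKET LAUNCH", 6),
--     ("ASSORTMENT", 6),
--     ("UE/PRICING", 6),
--     ("MULTIPLE TABLES", 6),
--     ("ACQUISITION TABLE", 5),
--     ("DECLINE", 5),
--     ("P&L MISS", 6),
--     ("GAP", 6),
--     ("DELAYED", 3),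
-- ]
--
-- def score_slide(anomalies, memory):
--     """Keyword-major scoring: sweep the slide once per severity keyword, in
--     decreasing priority; each pass scores the anomalies that mention the
--     keyword and eliminates them so a lower-priority keyword never sees them.
--     (Each anomaly thus contributes the points of its highest-priority keyword,
--     exactly the first-match semantics of the elif chain.)"""
--     score = 0
--     remaining = list(anomalies)
--     for sub, pts in _SEVERITY_TABLE:
--         survivors = []
--         for a in remaining:
--             if sub in a:
--                 score += pts
--             else:
--                 survivors.append(a)
--         remaining = survivors
--     for _ in memory:
--         score += 2
--     return score
-- ===== Notes on version B (the rewrite author's own statement) =====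
-- stated objective: alternative
-- what changed: B inverts the loop nesting: instead of running the 18-branch elif chain on each anomaly, it sweeps the anomaly list once per severity keyword in priority order, scoring and eliminating the anomalies that match so later (lower-priority) keywords never see them; the memory tally loop is kept.
import Mathlib
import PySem

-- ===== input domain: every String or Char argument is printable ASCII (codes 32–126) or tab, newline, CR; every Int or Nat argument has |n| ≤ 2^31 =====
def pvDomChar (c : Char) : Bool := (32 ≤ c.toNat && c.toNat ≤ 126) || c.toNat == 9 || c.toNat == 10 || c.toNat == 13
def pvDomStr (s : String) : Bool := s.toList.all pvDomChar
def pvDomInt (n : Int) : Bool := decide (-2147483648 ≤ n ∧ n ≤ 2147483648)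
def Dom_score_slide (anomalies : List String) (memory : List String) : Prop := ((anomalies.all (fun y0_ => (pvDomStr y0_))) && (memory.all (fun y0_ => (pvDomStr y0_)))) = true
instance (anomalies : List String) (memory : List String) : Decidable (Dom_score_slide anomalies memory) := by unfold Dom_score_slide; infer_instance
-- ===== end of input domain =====

-- B replaces A's anomaly-major elif chain by keyword-major sweeps that score and eliminate matching anomalies; objective: alternative.

-- ===== PORT A =====
-- literal port of A's elif chain inside the anomalies loop
def score_slide (anomalies : List String) (memory : List String) : Int :=
  let score : Int := 0
  let score := anomalies.foldl (fun score a =>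
    if PySem.Str.isIn "SEVERE" a then score + 10
    else if PySem.Str.isIn "MODERATE" a then score + 6
    else if PySem.Str.isIn "MILD" a then score + 3
    else if PySem.Str.isIn "MASKED LOSS" a then score + 8
    else if PySem.Str.isIn "CRISIS" a then score + 9
    else if PySem.Str.isIn "CROSS-SLIDE MISMATCH" a then score + 8
    else if PySem.Str.isIn "NEW PROPOSAL" a then score + 7
    else if PySem.Str.isIn "COMPENSATION" a then score + 7
    else if PySem.Str.isIn "STATED CAUSE" a then score + 7
    else if PySem.Str.isIn "MARKET LAUNCH" a then score + 6
    else if PySem.Str.isIn "ASSORTMENT" a then score + 6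
    else if PySem.Str.isIn "UE/PRICING" a then score + 6
    else if PySem.Str.isIn "MULTIPLE TABLES" a then score + 6
    else if PySem.Str.isIn "ACQUISITION TABLE" a then score + 5
    else if PySem.Str.isIn "DECLINE" a then score + 5
    else if PySem.Str.isIn "P&L MISS" a then score + 6
    else if PySem.Str.isIn "GAP" a then score + 6
    else if PySem.Str.isIn "DELAYED" a then score + 3
    else score) score
  memory.foldl (fun score _ => score + 2) score

-- ===== PORT B =====
def severityTable : List (String × Int) :=
  [("SEVERE", 10), ("MODERATE", 6), ("MILD", 3), ("MASKED LOSS", 8), ("CRISIS", 9),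
   ("CROSS-SLIDE MISMATCH", 8), ("NEW PROPOSAL", 7), ("COMPENSATION", 7), ("STATED CAUSE", 7),
   ("MARKET LAUNCH", 6), ("ASSORTMENT", 6), ("UE/PRICING", 6), ("MULTIPLE TABLES", 6),
   ("ACQUISITION TABLE", 5), ("DECLINE", 5), ("P&L MISS", 6), ("GAP", 6), ("DELAYED", 3)]

-- one keyword-major pass of B: score the matches, keep the survivors
def sweep (st : Int × List String) (p : String × Int) : Int × List String :=
  st.2.foldl (fun st2 a =>
    if PySem.Str.isIn p.1 a then (st2.1 + p.2, st2.2) else (st2.1, st2.2 ++ [a]))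
    (st.1, [])

def score_slide_alt (anomalies : List String) (memory : List String) : Int :=
  let st := severityTable.foldl sweep (0, anomalies)
  memory.foldl (fun score _ => score + 2) st.1

-- ===== PRECONDITION & SPEC =====
def Spec_score_slide (anomalies : List String) (memory : List String) (out : Int) : Prop := out = score_slide_alt anomalies memory
instance (anomalies : List String) (memory : List String) (out : Int) : Decidable (Spec_score_slide anomalies memory out) := by unfold Spec_score_slide; infer_instance

-- ===== CLAIM (what is proved, stated in full; the proofs are below) =====
def Claim_equal_score_slide : Prop := ∀ (anomalies : List String) (memory : List String), Dom_score_slide anomalies memory → Spec_score_slide anomalies memory (score_slide anomalies memory)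

-- ===== LEMMAS AND PROOFS =====

-- first-match points of an anomaly against a table (proof-only abstraction of both programs)
def firstPts (a : String) : List (String × Int) → Int
  | [] => 0
  | (sub, pts) :: rest => if PySem.Str.isIn sub a then pts else firstPts a rest

@[simp] theorem firstPts_nil (a : String) : firstPts a [] = 0 := rfl
@[simp] theorem firstPts_cons (a sub : String) (pts : Int) (t : List (String × Int)) :
    firstPts a ((sub, pts) :: t) = if PySem.Str.isIn sub a then pts else firstPts a t := rfl

-- one sweep, characterised: score grows by pts per match, survivors = non-matches appended
theorem sweep_inner (sub : String) (pts : Int) (l : List String) (s : Int) (acc : List String) :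
    l.foldl (fun st2 a =>
        if PySem.Str.isIn sub a then (st2.1 + pts, st2.2) else (st2.1, st2.2 ++ [a]))
      (s, acc)
    = (s + pts * ((l.filter (fun a => PySem.Str.isIn sub a)).length : Int),
       acc ++ l.filter (fun a => !PySem.Str.isIn sub a)) := by
  induction l generalizing s acc with
  | nil => simp
  | cons a l ih =>
      by_cases h : PySem.Str.isIn sub a = true
      · simp only [List.foldl_cons, h, if_true, List.filter_cons, Bool.not_true]
        rw [ih]
        simp [mul_add]
        ring
      · simp only [List.foldl_cons, h, List.filter_cons, Bool.not_false]
        rw [ih]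
        simp

-- distributing one table entry over the anomaly sum
theorem split_sum (p : String → Bool) (pts : Int) (g : String → Int) (l : List String) :
    pts * ((l.filter p).length : Int) + ((l.filter (fun a => !p a)).map g).sum
    = (l.map (fun a => if p a then pts else g a)).sum := by
  induction l with
  | nil => simp
  | cons a l ih =>
      by_cases h : p a = true
      · simp [h]
        rw [← ih]
        ring
      · simp [h]
        rw [← ih]
        ring

-- the sweep-fold over a table computes the sum of first-match points
theorem sweeps_eq (t : List (String × Int)) (l : List String) (s : Int) :
    (t.foldl sweep (s, l)).1 = s + (l.map (fun a => firstPts a t)).sum := by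
  induction t generalizing l s with
  | nil => simp
  | cons p t iht =>
      obtain ⟨sub, pts⟩ := p
      simp only [List.foldl_cons, sweep]
      rw [sweep_inner, iht]
      simp only [List.nil_append, firstPts_cons, add_assoc]
      rw [split_sum]

-- A's elif chain is exactly firstPts against the table
theorem chain_eq_firstPts (a : String) (score : Int) :
    (if PySem.Str.isIn "SEVERE" a then score + 10
    else if PySem.Str.isIn "MODERATE" a then score + 6
    else if PySem.Str.isIn "MILD" a then score + 3
    else if PySem.Str.isIn "MASKED LOSS" a then score + 8
    else if PySem.Str.isIn "CRISIS" a then score + 9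
    else if PySem.Str.isIn "CROSS-SLIDE MISMATCH" a then score + 8
    else if PySem.Str.isIn "NEW PROPOSAL" a then score + 7
    else if PySem.Str.isIn "COMPENSATION" a then score + 7
    else if PySem.Str.isIn "STATED CAUSE" a then score + 7
    else if PySem.Str.isIn "MARKET LAUNCH" a then score + 6
    else if PySem.Str.isIn "ASSORTMENT" a then score + 6
    else if PySem.Str.isIn "UE/PRICING" a then score + 6
    else if PySem.Str.isIn "MULTIPLE TABLES" a then score + 6
    else if PySem.Str.isIn "ACQUISITION TABLE" a then score + 5
    else if PySem.Str.isIn "DECLINE" a then score + 5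
    else if PySem.Str.isIn "P&L MISS" a then score + 6
    else if PySem.Str.isIn "GAP" a then score + 6
    else if PySem.Str.isIn "DELAYED" a then score + 3
    else score) = score + firstPts a severityTable := by
  simp only [severityTable, firstPts_cons, firstPts_nil,
    apply_ite (fun x => score + x), add_zero]

-- ===== VERDICT (by name: the statement is the Claim_ definition above) =====
theorem score_slide_spec : Claim_equal_score_slide := by
  intro anomalies memory _
  unfold Spec_score_slide score_slide score_slide_alt
  simp only
  rw [sweeps_eq]
  congr 1
  rw [← PySem.List.foldl_add]
  apply PySem.List.foldl_congr_mem
  intro sc a _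
  exact chain_eq_firstPts a sc
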